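-- pv_equiv track=rewrite | github.com/Edmond120/graph_scripts | most_popular_profiles/tie_breaker.py | compress_seq
-- ===== SOURCE A (Python) =====
-- def compress_seq(sequence):
-- 	counts = {}
-- 	for degree in sequence:
-- 		if degree in counts:
-- 			counts[degree] += 1
-- 		else:
-- 			counts[degree] = 1
-- 	s = ['(']
-- 	for num in sorted(counts, reverse=True):
-- 		s.append(str(num))
-- 		s.append('^')
-- 		s.append(str(counts[num]))
-- 		s.append(',')
-- 	s.pop(-1)
-- 	s.append(')')
-- 	return ''.join(s)
-- ===== SOURCE B (Python) =====
-- def compress_seq(sequence):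
-- 	# sort once (descending), then emit one "value^runlength" chunk per run
-- 	# and join the chunks with commas; intended output on an empty sequence
-- 	# is '()' (A returns ')').
-- 	xs = sorted(sequence, reverse=True)
-- 	groups = []
-- 	i, n = 0, len(xs)
-- 	while i < n:
-- 		j = i + 1
-- 		while j < n and xs[j] == xs[i]:
-- 			j += 1
-- 		groups.append(str(xs[i]) + '^' + str(j - i))
-- 		i = j
-- 	return '(' + ','.join(groups) + ')'
-- ===== Notes on version B (the rewrite author's own statement) =====
-- stated objective: alternative
-- what changed: Replaces A's dict-counting-then-sort-keys with one descending sort of the whole sequence followed by a single run-length scan, assembling the result with ','.join instead of appending pieces and popping the trailing comma.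
-- intended difference: On the empty sequence A's pop(-1) removes the opening '(' and A returns the unbalanced ')', while B returns '()', the intended compression of an empty sequence. — e.g. on compress_seq([]): A returns ")", B returns "()"
import Mathlib
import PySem

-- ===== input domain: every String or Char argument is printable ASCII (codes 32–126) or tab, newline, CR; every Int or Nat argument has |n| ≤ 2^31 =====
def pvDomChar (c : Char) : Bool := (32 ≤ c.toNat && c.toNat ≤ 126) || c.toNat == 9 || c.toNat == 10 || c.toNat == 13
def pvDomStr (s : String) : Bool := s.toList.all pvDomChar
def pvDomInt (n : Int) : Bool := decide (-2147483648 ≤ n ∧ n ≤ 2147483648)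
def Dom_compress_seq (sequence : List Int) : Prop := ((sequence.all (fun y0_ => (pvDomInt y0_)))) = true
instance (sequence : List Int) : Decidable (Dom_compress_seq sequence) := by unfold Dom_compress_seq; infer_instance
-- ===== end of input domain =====

-- B replaces A's hash-count-then-sort-keys with one sort of the whole sequence followed by a
-- single run-length scan assembled with ','.join (objective: alternative; same O(n log n) cost).
-- On the empty sequence A returns ')' and B returns '()' (declared in D_ below).

-- ===== PORT A =====
def compress_seq (sequence : List Int) : String :=
  -- counts = {}; for degree in sequence: if degree in counts: counts[degree] += 1 else: = 1
  let counts : PySem.Dict Int Int :=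
    sequence.foldl (fun counts degree =>
      if counts.contains degree then counts.insert degree (counts.getD degree 0 + 1)
      else counts.insert degree 1) PySem.Dict.empty
  -- s = ['(']; for num in sorted(counts, reverse=True): four appends per key
  let s : List String :=
    (PySem.List.sorted counts.keys (fun x => x) true).foldl
      (fun s num => s ++ [PySem.Int.toStr num, "^", PySem.Int.toStr (counts.getD num 0), ","]) ["("]
      -- counts[num]: num is a key of counts, so getD reads the stored value (never the default)
  -- s.pop(-1); s.append(')'); return ''.join(s)
  match PySem.List.pop? s (-1) with
  | some (_, rest) => PySem.Str.join "" (rest ++ [")"])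
  | none => ""   -- unreachable: s always contains at least "("

-- ===== PORT B =====
-- the outer while loop of Source B, one recursive step per run: the inner 'while j' counting the
-- run is the takeWhile prefix, 'i = j' leaves the dropWhile remainder
def pvGroupsB : List Int → List String
  | [] => []
  | x :: rest =>
    (PySem.Int.toStr x ++ "^" ++
       PySem.Int.toStr ((1 + (rest.takeWhile (fun y => y == x)).length : Nat) : Int)) ::
      pvGroupsB (rest.dropWhile (fun y => y == x))
termination_by xs => xs.length
decreasing_by simpa using Nat.lt_succ_of_le (List.length_dropWhile_le _ _)

def compress_seq_alt (sequence : List Int) : String :=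
  let xs := PySem.List.sorted sequence (fun x => x) true
  "(" ++ PySem.Str.join "," (pvGroupsB xs) ++ ")"

-- ===== PRECONDITION & SPEC =====
-- On the empty sequence A's pop(-1) removes the opening '(' and A returns the unbalanced ')';
-- B returns '()', the intended compression of an empty sequence.
def D_compress_seq (sequence : List Int) : Prop := sequence = []
instance (sequence : List Int) : Decidable (D_compress_seq sequence) := by
  unfold D_compress_seq; infer_instance

def Spec_compress_seq (sequence : List Int) (out : String) : Prop :=
  ¬ D_compress_seq sequence → out = compress_seq_alt sequence
instance (sequence : List Int) (out : String) : Decidable (Spec_compress_seq sequence out) := by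
  unfold Spec_compress_seq; infer_instance

def pvDiffWitness_compress_seq : List Int := []
def pvDiffWitnessOut_compress_seq : String × String := (")", "()")

-- ===== CLAIM (what is proved, stated in full; the proofs are below) =====
def Claim_unchanged_compress_seq : Prop :=
  ∀ (sequence : List Int), Dom_compress_seq sequence → Spec_compress_seq sequence (compress_seq sequence)
def Claim_changed_compress_seq : Prop :=
  Dom_compress_seq (pvDiffWitness_compress_seq) ∧ D_compress_seq (pvDiffWitness_compress_seq) ∧
  compress_seq (pvDiffWitness_compress_seq) = pvDiffWitnessOut_compress_seq.1 ∧
  compress_seq_alt (pvDiffWitness_compress_seq) = pvDiffWitnessOut_compress_seq.2 ∧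
  pvDiffWitnessOut_compress_seq.1 ≠ pvDiffWitnessOut_compress_seq.2
def Claim_exact_compress_seq : Prop :=
  ∀ (sequence : List Int), Dom_compress_seq sequence → D_compress_seq sequence →
    compress_seq sequence ≠ compress_seq_alt sequence

-- ===== LEMMAS AND PROOFS =====

-- A's counting loop is Counter(sequence)
lemma pvCounts_eq (sequence : List Int) :
    sequence.foldl (fun d x =>
      if d.contains x then d.insert x (d.getD x 0 + 1) else d.insert x 1) PySem.Dict.empty
    = PySem.Dict.counter sequence := by
  rw [← PySem.Dict.foldl_insert_getD_add_one_eq_counter]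
  congr 1
  funext d x
  by_cases h : d.contains x
  · simp [h]
  · have h0 : d.get? x = none := (PySem.Dict.get?_eq_none_iff_contains d x).mpr (by simpa using h)
    simp [h, PySem.Dict.getD, h0]

-- set(xs) is a sublist of xs (first occurrences, in order)
lemma pvOfList_sublist (xs : List Int) : (PySem.Set.ofList xs).Sublist xs := by
  induction xs with
  | nil => simp [PySem.Set.ofList_nil]
  | cons x r ih =>
    rw [PySem.Set.ofList_cons]
    exact List.Sublist.cons₂ x
      (List.Sublist.trans (by simp only [PySem.Set.discard]; exact List.filter_sublist) ih)

-- dedup of a reverse-sorted list is strictly decreasing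
lemma pvDedup_pairwise_gt (xs : List Int) (h : xs.Pairwise (fun a b => b ≤ a)) :
    (PySem.List.dedup xs).Pairwise (fun a b => b < a) := by
  rw [PySem.List.dedup_eq_ofList]
  have h1 : (PySem.Set.ofList xs).Pairwise (fun a b => b ≤ a) := h.sublist (pvOfList_sublist xs)
  have h2 : (PySem.Set.ofList xs).Pairwise (fun a b => a ≠ b) := PySem.Set.nodup_ofList xs
  exact (h1.and h2).imp (fun hab => lt_of_le_of_ne hab.1 (Ne.symm hab.2))

-- sorted(set(sequence), reverse=True) = dedup of sorted(sequence, reverse=True)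
lemma pvKeys_sorted (sequence : List Int) :
    PySem.List.sorted (PySem.Set.ofList sequence) (fun x => x) true
      = PySem.List.dedup (PySem.List.sorted sequence (fun x => x) true) := by
  apply PySem.List.sorted_rev_eq_of_perm_of_pairwise_gt
  · rw [List.perm_ext_iff_of_nodup
      (by rw [PySem.List.dedup_eq_ofList]; exact PySem.Set.nodup_ofList _)
      (PySem.Set.nodup_ofList _)]
    intro a
    rw [PySem.List.mem_dedup, PySem.List.mem_sorted, PySem.Set.mem_ofList]
  · exact pvDedup_pairwise_gt _ (PySem.List.sorted_pairwise_rev _ _)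

-- after an initial run of x's followed by an x-free tail, dedup keeps x once then dedups the tail
lemma pvDedup_cons_run (x : Int) (t d : List Int)
    (ht : ∀ y ∈ t, y = x) (hd : x ∉ d) :
    PySem.List.dedup (x :: (t ++ d)) = x :: PySem.List.dedup d := by
  simp only [PySem.List.dedup_eq_ofList]
  rw [PySem.Set.ofList_cons]
  congr 1
  induction t with
  | nil =>
    simp only [List.nil_append, PySem.Set.discard]
    apply List.filter_eq_self.mpr
    intro y hy
    have hyx : y ≠ x := fun hxy => hd (by rw [← hxy]; exact (PySem.Set.mem_ofList d y).mp hy)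
    simp [hyx]
  | cons y t' ih =>
    have hy : y = x := ht y (by simp)
    rw [List.cons_append, hy, PySem.Set.ofList_cons]
    have ih' := ih (fun z hz => ht z (by simp [hz]))
    simp only [PySem.Set.discard, List.filter_cons, BEq.rfl, Bool.not_true, Bool.false_eq_true,
      if_false, List.filter_filter] at ih' ⊢
    simpa only [Bool.and_self] using ih'

-- the tail after a run contains no further copy of the run value
lemma pvNot_mem_dropWhile (x : Int) (rest : List Int)
    (h : rest.Pairwise (fun a b => b ≤ a)) (hle : ∀ y ∈ rest, y ≤ x) :
    x ∉ rest.dropWhile (fun y => y == x) := by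
  intro hx
  rcases hd : rest.dropWhile (fun y => y == x) with _ | ⟨h0, d'⟩
  · rw [hd] at hx; simp at hx
  · rw [hd] at hx
    have hne : rest.dropWhile (fun y => y == x) ≠ [] := by rw [hd]; simp
    have h2 := List.head_dropWhile_not (fun y => y == x) hne
    simp only [hd, List.head_cons, beq_eq_false_iff_ne] at h2
    have hdp : (h0 :: d').Pairwise (fun a b => b ≤ a) := hd ▸ h.sublist (List.dropWhile_sublist _)
    have hmem : h0 ∈ rest := (List.dropWhile_sublist (fun y => y == x)).mem (by rw [hd]; simp)
    rcases List.mem_cons.mp hx with h1 | h1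
    · exact h2 h1.symm
    · exact h2 (le_antisymm (hle h0 hmem) ((List.pairwise_cons.mp hdp).1 x h1))

-- B's run-length scan of a reverse-sorted list, characterised over dedup and count
lemma pvGroups_eq : ∀ (n : Nat) (xs : List Int), xs.length ≤ n →
    xs.Pairwise (fun a b => b ≤ a) →
    pvGroupsB xs = (PySem.List.dedup xs).map
      (fun k => PySem.Int.toStr k ++ "^" ++ PySem.Int.toStr ((xs.count k : Nat) : Int)) := by
  intro n
  induction n with
  | zero =>
    intro xs hlen _
    have : xs = [] := List.length_eq_zero_iff.mp (Nat.le_zero.mp hlen)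
    subst this
    simp [pvGroupsB, PySem.List.dedup_eq_ofList, PySem.Set.ofList_nil]
  | succ n ih =>
    intro xs hlen hp
    cases xs with
    | nil => simp [pvGroupsB, PySem.List.dedup_eq_ofList, PySem.Set.ofList_nil]
    | cons x rest =>
      obtain ⟨hle, hrest⟩ := List.pairwise_cons.mp hp
      have ht : ∀ y ∈ rest.takeWhile (fun y => y == x), y = x :=
        fun y hy => by simpa using List.mem_takeWhile_imp hy
      have hdnm : x ∉ rest.dropWhile (fun y => y == x) :=
        pvNot_mem_dropWhile x rest hrest hle
      have hsplit : rest.takeWhile (fun y => y == x) ++ rest.dropWhile (fun y => y == x) = rest :=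
        List.takeWhile_append_dropWhile
      have hded : PySem.List.dedup (x :: rest)
          = x :: PySem.List.dedup (rest.dropWhile (fun y => y == x)) := by
        conv_lhs => rw [← hsplit]
        exact pvDedup_cons_run x _ _ ht hdnm
      have hdp : (rest.dropWhile (fun y => y == x)).Pairwise (fun a b => b ≤ a) :=
        hrest.sublist (List.dropWhile_sublist _)
      have hdl : (rest.dropWhile (fun y => y == x)).length ≤ n := by
        have h1 := List.length_dropWhile_le (fun y => y == x) rest
        have h2 : rest.length + 1 ≤ n + 1 := by simpa using hlen
        omega
      have hct : List.count x (rest.takeWhile (fun y => y == x))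
          = (rest.takeWhile (fun y => y == x)).length :=
        List.count_eq_length.mpr (fun b hb => (ht b hb).symm)
      have hcd : List.count x (rest.dropWhile (fun y => y == x)) = 0 :=
        List.count_eq_zero.mpr hdnm
      have hcr : List.count x rest = (rest.takeWhile (fun y => y == x)).length := by
        conv_lhs => rw [← hsplit]
        rw [List.count_append, hct, hcd]
        omega
      have hcnt : List.count x (x :: rest) = 1 + (rest.takeWhile (fun y => y == x)).length := by
        rw [List.count_cons_self, hcr]
        omega
      rw [pvGroupsB, hded, List.map_cons, ih _ hdl hdp, hcnt]
      congr 1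
      apply List.map_congr_left
      intro k hk
      have hkd : k ∈ rest.dropWhile (fun y => y == x) := (PySem.List.mem_dedup _ _).mp hk
      have hkx : x ≠ k := fun hxk => hdnm (hxk ▸ hkd)
      have hkt : List.count k (rest.takeWhile (fun y => y == x)) = 0 :=
        List.count_eq_zero.mpr (fun hmem => hkx (ht k hmem).symm)
      have hck : List.count k rest = List.count k (rest.dropWhile (fun y => y == x)) := by
        conv_lhs => rw [← hsplit]
        rw [List.count_append, hkt]
        omega
      rw [List.count_cons_of_ne hkx, hck]

-- ''.join with an empty separator is flatten
lemma pvJoin_nil_eq_flatten : ∀ (ls : List (List Char)), PySem.Chars.join [] ls = ls.flatten := by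
  intro ls
  induction ls with
  | nil => simp [PySem.Chars.join_nil]
  | cons p rest ih =>
    cases rest with
    | nil => simp [PySem.Chars.join_singleton]
    | cons q rest' => rw [PySem.Chars.join_cons_cons, ih]; simp

-- A's flat piece list always ends in the "," piece
lemma pvFlat_decomp (a c : Int → String) :
    ∀ (gs : List Int) (k : Int), ∃ D,
      (k :: gs).flatMap (fun n => [a n, "^", c n, ","]) = D ++ [","] := by
  intro gs
  induction gs with
  | nil => intro k; exact ⟨[a k, "^", c k], by simp⟩
  | cons k' gs' ih =>
    intro k
    obtain ⟨D, hD⟩ := ih k'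
    exact ⟨a k :: "^" :: c k :: "," :: D, by simp [hD]⟩

-- char level: flatten of the comma-stripped piece list = ','-join of the whole group strings
lemma pvCoreChars (a c : Int → String) :
    ∀ (gs : List Int) (k : Int),
      ((((k :: gs).flatMap (fun n => [a n, "^", c n, ","])).dropLast).map String.toList).flatten
        = PySem.Chars.join [','] (((k :: gs).map (fun n => a n ++ "^" ++ c n)).map String.toList) := by
  intro gs
  induction gs with
  | nil =>
    intro k
    simp [PySem.Chars.join_singleton]
  | cons k' gs' ih =>
    intro k
    obtain ⟨D, hD⟩ := pvFlat_decomp a c gs' k'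
    have ih' := ih k'
    rw [hD, List.dropLast_concat] at ih'
    rw [List.flatMap_cons, hD,
      show [a k, "^", c k, ","] ++ (D ++ [","]) = ([a k, "^", c k, ","] ++ D) ++ [","] by simp,
      List.dropLast_concat]
    simp only [List.map_cons, PySem.Chars.join_cons_cons]
    simp only [List.map_cons] at ih'
    rw [← ih']
    simp

-- string level: drop-the-trailing-comma assembly = ','.join assembly
lemma pvCore (a c : Int → String) (gs : List Int) (k : Int) :
    PySem.Str.join "" ("(" :: ((k :: gs).flatMap (fun n => [a n, "^", c n, ","])).dropLast ++ [")"])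
      = "(" ++ PySem.Str.join "," ((k :: gs).map (fun n => a n ++ "^" ++ c n)) ++ ")" := by
  apply String.toList_inj.mp
  have hc := pvCoreChars a c gs k
  rw [String.toList_append, String.toList_append, PySem.Str.toList_join, PySem.Str.toList_join,
    show ("" : String).toList = [] from rfl, show ("," : String).toList = [','] from rfl,
    pvJoin_nil_eq_flatten]
  simp only [List.map_cons, List.map_append, List.map_nil, List.flatten_cons,
    List.flatten_append, List.flatten_nil] at hc ⊢
  rw [hc]
  simp

-- the empty-sequence values of the two ports
lemma pvA_nil : compress_seq [] = ")" := by decide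

lemma pvB_nil : compress_seq_alt [] = "()" := by
  apply String.toList_inj.mp
  simp [compress_seq_alt, pvGroupsB, PySem.List.sorted, PySem.Str.toList_join,
    PySem.Chars.join_nil]

theorem compress_seq_spec : Claim_unchanged_compress_seq := by
  intro sequence _
  unfold Spec_compress_seq
  intro hnD
  have hne : sequence ≠ [] := hnD
  show compress_seq sequence = compress_seq_alt sequence
  simp only [compress_seq, compress_seq_alt]
  rw [pvCounts_eq, PySem.Dict.keys_counter, pvKeys_sorted, PySem.List.foldl_append_eq_flatMap]
  have hc : ∀ n : Int, (PySem.Dict.counter sequence).getD n 0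
      = ((List.count n (PySem.List.sorted sequence (fun x => x) true) : Nat) : Int) := by
    intro n
    rw [PySem.Dict.getD_counter]
    exact_mod_cast ((PySem.List.sorted_perm sequence (fun x => x) true).count_eq n).symm
  simp only [hc]
  rw [pvGroups_eq (PySem.List.sorted sequence (fun x => x) true).length _ le_rfl
    (PySem.List.sorted_pairwise_rev _ _)]
  cases hdd : PySem.List.dedup (PySem.List.sorted sequence (fun x => x) true) with
  | nil =>
    exfalso
    apply hne
    have hxs : PySem.List.sorted sequence (fun x => x) true = [] := by
      rw [PySem.List.dedup_eq_ofList] at hdd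
      cases hx : PySem.List.sorted sequence (fun x => x) true with
      | nil => rfl
      | cons z zs =>
        rw [hx, PySem.Set.ofList_cons] at hdd
        exact absurd hdd (by simp)
    exact (PySem.List.sorted_eq_nil_iff sequence (fun x => x) true).mp hxs
  | cons k gs =>
    obtain ⟨D, hD⟩ := pvFlat_decomp (fun n => PySem.Int.toStr n)
      (fun n => PySem.Int.toStr ((List.count n (PySem.List.sorted sequence (fun x => x) true) : Nat) : Int)) gs k
    rw [hD, show ["("] ++ (D ++ [","]) = ("(" :: D) ++ [","] by simp, PySem.List.pop?_last]
    have hDrop : D = ((k :: gs).flatMap (fun n => [PySem.Int.toStr n, "^",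
        PySem.Int.toStr ((List.count n (PySem.List.sorted sequence (fun x => x) true) : Nat) : Int), ","])).dropLast := by
      rw [hD, List.dropLast_concat]
    rw [hDrop]
    exact pvCore _ _ gs k

theorem compress_seq_changed : Claim_changed_compress_seq := by
  unfold Claim_changed_compress_seq pvDiffWitness_compress_seq pvDiffWitnessOut_compress_seq
  exact ⟨by decide, rfl, pvA_nil, pvB_nil, by decide⟩

theorem compress_seq_tight : Claim_exact_compress_seq := by
  intro sequence _ hD
  have h : sequence = [] := hD
  subst h
  rw [pvA_nil, pvB_nil]
  decide
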